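-- pv_equiv track=rewrite | github.com/swinowz/Discord-Reminder-Bot | bot.py | parse_time_str
-- ===== SOURCE A (Python) =====
-- def parse_time_str(time_str: str) -> str:
--     """Return a HH:MM:SS string applying smart defaults"""
--     if not time_str:
--         return "00:00:01"
--     parts = time_str.split(":")
--     if len(parts) == 1:
--         return f"{parts[0].zfill(2)}:00:00"
--     if len(parts) == 2:
--         return f"{parts[0].zfill(2)}:{parts[1].zfill(2)}:00"
--     if len(parts) == 3:
--         return ":".join(p.zfill(2) for p in parts[:3])
--     raise ValueError("Invalid time format")
-- ===== SOURCE B (Python) =====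
-- def parse_time_str(time_str: str) -> str:
--     """Return a HH:MM:SS string applying smart defaults"""
--     if not time_str:
--         return "00:00:01"
--     return _fill(time_str, 3)
--
--
-- def _fill(t: str, slots: int) -> str:
--     """Consume one colon-delimited field recursively; slots fields remain to emit."""
--     if slots == 0:
--         raise ValueError("Invalid time format")
--     i = t.find(":")
--     if i == -1:
--         return t.zfill(2) + ":00" * (slots - 1)
--     return t[:i].zfill(2) + ":" + _fill(t[i + 1:], slots - 1)
-- ===== Notes on version B (the rewrite author's own statement) =====
-- stated objective: alternative
-- what changed: B never builds the list of parts: it recursively consumes one colon-delimited field at a time with str.find and slicing, carrying a remaining-slots counter that both pads the missing trailing fields and raises when a fourth field is encountered, instead of A's split-into-a-list followed by per-length format branches.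
import Mathlib
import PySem

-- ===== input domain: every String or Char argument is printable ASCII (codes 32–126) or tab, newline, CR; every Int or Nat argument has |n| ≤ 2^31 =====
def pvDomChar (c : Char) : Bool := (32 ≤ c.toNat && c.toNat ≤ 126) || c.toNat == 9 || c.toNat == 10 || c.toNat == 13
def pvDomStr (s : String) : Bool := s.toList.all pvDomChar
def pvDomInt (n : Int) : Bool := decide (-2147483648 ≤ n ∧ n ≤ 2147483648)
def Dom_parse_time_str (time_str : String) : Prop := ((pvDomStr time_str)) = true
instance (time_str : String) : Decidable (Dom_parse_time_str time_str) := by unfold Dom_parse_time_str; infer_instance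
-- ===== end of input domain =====

-- B replaces A's split-into-parts-then-branch-per-length by a recursive descent that consumes
-- one colon-delimited field at a time with find/slicing and a remaining-slots counter (objective: alternative).

-- the split on the colon separator — exact: the separator is nonempty, so Python's split is Chars.splitOn
def pvSplitColon (time_str : String) : List String :=
  (PySem.Chars.splitOn time_str.toList ":".toList).map String.ofList

-- ===== PORT A =====
def parse_time_str (time_str : String) : String :=
  if time_str = "" then "00:00:01"
  else
    let parts := pvSplitColon time_str
    if parts.length = 1 then
      PySem.Str.zfill (parts.getD 0 "") 2 ++ ":00:00"
    else if parts.length = 2 then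
      PySem.Str.zfill (parts.getD 0 "") 2 ++ ":" ++ PySem.Str.zfill (parts.getD 1 "") 2 ++ ":00"
    else
      -- parts.length = 3 here (len(parts) > 3 raises ValueError; excluded by Pre_)
      PySem.Str.join ":" ((PySem.List.slice parts none (some 3)).map (fun p => PySem.Str.zfill p 2))

-- ===== PORT B =====
-- _fill(t, slots): consume one colon-delimited field recursively via find and slicing;
-- slots == 0 is Python's raise ValueError (excluded by Pre_); the repeated pad suffix is the flatten of a replicate.
def pvFill (t : List Char) (slots : Nat) : List Char :=
  match slots with
  | 0 => []   -- raise ValueError("Invalid time format"); unreachable under Pre_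
  | s + 1 =>
    let i := PySem.Chars.find t [':']
    if i = -1 then
      PySem.Chars.zfill t 2 ++ (List.replicate s [':', '0', '0']).flatten
    else
      PySem.Chars.zfill (PySem.List.slice t none (some i)) 2 ++ [':'] ++
        pvFill (PySem.List.slice t (some (i + 1)) none) s

def parse_time_str_alt (time_str : String) : String :=
  if time_str = "" then "00:00:01"
  else String.ofList (pvFill time_str.toList 3)

-- ===== PRECONDITION & SPEC =====
-- Pre_ excludes exactly the inputs with more than three colon-separated parts, on which both A and B raise ValueError.
def Pre_parse_time_str (time_str : String) : Prop :=
  time_str = "" ∨ (pvSplitColon time_str).length ≤ 3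
instance (time_str : String) : Decidable (Pre_parse_time_str time_str) := by
  unfold Pre_parse_time_str; infer_instance
def pvWitness_parse_time_str : String := "5:3"

def Spec_parse_time_str (time_str : String) (out : String) : Prop := out = parse_time_str_alt time_str
instance (time_str : String) (out : String) : Decidable (Spec_parse_time_str time_str out) := by unfold Spec_parse_time_str; infer_instance

-- ===== CLAIM (what is proved, stated in full; the proofs are below) =====
def Claim_equal_parse_time_str : Prop := ∀ (time_str : String), Dom_parse_time_str time_str → Pre_parse_time_str time_str → Spec_parse_time_str time_str (parse_time_str time_str)

-- ===== LEMMAS AND PROOFS =====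

-- Reference splitter: split a char list at colons
def pvSplitC : List Char → List (List Char)
  | [] => [[]]
  | c :: rest =>
    if c = ':' then [] :: pvSplitC rest
    else
      match pvSplitC rest with
      | p :: ps => (c :: p) :: ps
      | [] => [[c]]

theorem pvSplitC_ne_nil (l : List Char) : pvSplitC l ≠ [] := by
  cases l with
  | nil => simp [pvSplitC]
  | cons c rest =>
    rw [pvSplitC.eq_def]
    simp only
    split_ifs
    · simp
    · cases pvSplitC rest <;> simp

theorem pvSplitC_cons_colon (rest : List Char) :
    pvSplitC (':' :: rest) = [] :: pvSplitC rest := by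
  rw [pvSplitC.eq_def]
  simp

theorem pvSplitC_cons_ne (c : Char) (rest q : List Char) (qs : List (List Char))
    (hc : c ≠ ':') (hr : pvSplitC rest = q :: qs) :
    pvSplitC (c :: rest) = (c :: q) :: qs := by
  conv_lhs => rw [pvSplitC.eq_def]
  simp [hc, hr]

theorem pvSplitC_no_colon (l : List Char) : ∀ p ∈ pvSplitC l, ':' ∉ p := by
  induction l with
  | nil => simp [pvSplitC]
  | cons c rest ih =>
    by_cases hc : c = ':'
    · subst hc
      rw [pvSplitC_cons_colon]
      intro p hp
      rcases List.mem_cons.mp hp with hp | hp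
      · simp [hp]
      · exact ih p hp
    · cases hr : pvSplitC rest with
      | nil => exact absurd hr (pvSplitC_ne_nil rest)
      | cons q qs =>
        rw [pvSplitC_cons_ne c rest q qs hc hr]
        intro p hp
        rcases List.mem_cons.mp hp with hp | hp
        · subst hp
          intro hm
          rcases List.mem_cons.mp hm with h1 | h1
          · exact hc h1.symm
          · exact ih q (by rw [hr]; exact List.mem_cons_self) h1
        · exact ih p (by rw [hr]; exact List.mem_cons.mpr (Or.inr hp))

theorem pvSplitC_cons_cases (l a : List Char) (ps : List (List Char))
    (h : pvSplitC l = a :: ps) :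
    (ps = [] ∧ l = a) ∨ ∃ rest, l = a ++ ':' :: rest ∧ pvSplitC rest = ps := by
  induction l generalizing a ps with
  | nil =>
    left
    simp [pvSplitC] at h
    simp_all
  | cons c rest ih =>
    by_cases hc : c = ':'
    · subst hc
      rw [pvSplitC_cons_colon] at h
      injection h with ha hps
      right
      exact ⟨rest, by simp [← ha], hps⟩
    · cases hr : pvSplitC rest with
      | nil => exact absurd hr (pvSplitC_ne_nil rest)
      | cons q qs =>
        rw [pvSplitC_cons_ne c rest q qs hc hr] at h
        injection h with ha hps
        rcases ih q qs hr with ⟨hqs, hrq⟩ | ⟨r, hrq, hpr⟩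
        · left
          subst hqs hrq
          simp_all
        · right
          refine ⟨r, ?_, by rw [← hps, hpr]⟩
          rw [← ha, hrq]
          simp

-- splitOn with the colon separator computes pvSplitC
theorem pvGo_eq (l : List Char) : ∀ (fuel : Nat) (cur : List Char) (acc : List (List Char)),
    l.length < fuel →
    PySem.Chars.splitOn.go [':'] fuel l cur acc
      = acc.reverse ++ ((pvSplitC l).modifyHead (cur.reverse ++ ·)) := by
  induction l with
  | nil =>
    intro fuel cur acc hf
    match fuel with
    | f + 1 =>
      unfold PySem.Chars.splitOn.go
      simp [pvSplitC]
  | cons c rest ih =>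
    intro fuel cur acc hf
    match fuel with
    | f + 1 =>
      unfold PySem.Chars.splitOn.go
      simp only [List.isPrefixOf]
      by_cases hc : c = ':'
      · subst hc
        rw [if_pos (by simp)]
        have hrec := ih f [] (List.reverse cur :: acc) (by simpa using Nat.lt_of_succ_lt_succ hf)
        simp only [List.length_nil, List.length_cons, List.drop_succ_cons, List.drop_zero] at hrec ⊢
        rw [hrec, pvSplitC_cons_colon]
        cases hps : pvSplitC rest with
        | nil => exact absurd hps (pvSplitC_ne_nil rest)
        | cons q qs => simp
      · rw [if_neg (by simp [Ne.symm hc])]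
        have hrec := ih f (c :: cur) acc (by simpa using Nat.lt_of_succ_lt_succ hf)
        rw [hrec]
        cases hps : pvSplitC rest with
        | nil => exact absurd hps (pvSplitC_ne_nil rest)
        | cons q qs =>
          rw [pvSplitC_cons_ne c rest q qs hc hps]
          simp

theorem pvSplitOn_eq (l : List Char) :
    PySem.Chars.splitOn l [':'] = pvSplitC l := by
  unfold PySem.Chars.splitOn
  rw [pvGo_eq l (l.length + 1) [] [] (Nat.lt_succ_self _)]
  cases hps : pvSplitC l with
  | nil => exact absurd hps (pvSplitC_ne_nil l)
  | cons q qs => simp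

theorem pvSplitColon_eq (s : String) :
    pvSplitColon s = (pvSplitC s.toList).map String.ofList := by
  unfold pvSplitColon
  have h : (":" : String).toList = [':'] := by decide
  rw [h, pvSplitOn_eq]

-- find on a colon-free string
theorem pvFind_no (t : List Char) (h : ':' ∉ t) : PySem.Chars.find t [':'] = -1 := by
  rw [PySem.Chars.find_eq_neg_one_iff]
  intro hinf
  exact h (hinf.subset (by simp))

-- find locates the first colon
theorem pvFind_at (p r : List Char) (h : ':' ∉ p) :
    PySem.Chars.find (p ++ ':' :: r) [':'] = (p.length : Int) := by
  set l := p ++ ':' :: r with hl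
  have hinf : [':'] <:+: l := ⟨p, r, by simp [hl]⟩
  have hnn : 0 ≤ PySem.Chars.find l [':'] := (PySem.Chars.find_nonneg_iff _ _).mpr hinf
  obtain ⟨hpre, hmin⟩ := PySem.Chars.find_spec hnn
  have hdropn : l.drop p.length = ':' :: r := by
    simp [hl]
  have hle : (PySem.Chars.find l [':']).toNat ≤ p.length := by
    by_contra hgt
    push Not at hgt
    exact hmin p.length hgt (by rw [hdropn]; exact ⟨r, rfl⟩)
  have hge : p.length ≤ (PySem.Chars.find l [':']).toNat := by
    by_contra hlt
    push Not at hlt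
    obtain ⟨tl, htl⟩ := hpre
    have hhead : l[(PySem.Chars.find l [':']).toNat]? = some ':' := by
      rw [← List.head?_drop, ← htl]
      rfl
    have hp : p[(PySem.Chars.find l [':']).toNat]? = some ':' := by
      rw [← hhead, hl]
      exact (List.getElem?_append_left hlt).symm
    exact h (List.mem_of_getElem? hp)
  have heq : (PySem.Chars.find l [':']).toNat = p.length := le_antisymm hle hge
  omega

-- evaluating pvFill on each shape
theorem pvFill_one (a : List Char) (h : ':' ∉ a) :
    pvFill a 3 = PySem.Chars.zfill a 2 ++ (':' :: '0' :: '0' :: ':' :: '0' :: '0' :: []) := by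
  unfold pvFill
  rw [pvFind_no a h]
  simp [List.replicate]

theorem pvFill_step (a rest : List Char) (h : ':' ∉ a) (s : Nat) :
    pvFill (a ++ ':' :: rest) (s + 1)
      = PySem.Chars.zfill a 2 ++ [':'] ++ pvFill rest s := by
  conv_lhs => rw [pvFill.eq_def]
  simp only
  rw [pvFind_at a rest h]
  have hne : (a.length : Int) ≠ -1 := by omega
  rw [if_neg hne]
  have h1 : PySem.List.slice (a ++ ':' :: rest) none (some (a.length : Int)) = a := by
    rw [PySem.List.slice_to_natCast]
    simp
  have h2 : PySem.List.slice (a ++ ':' :: rest) (some ((a.length : Int) + 1)) none = rest := by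
    have hc : (a.length : Int) + 1 = ((a.length + 1 : Nat) : Int) := by push_cast; ring
    rw [hc, PySem.List.slice_from_natCast]
    have hsp : a ++ ':' :: rest = (a ++ [':']) ++ rest := by simp
    rw [hsp]
    have hlen : a.length + 1 = (a ++ [':']).length := by simp
    rw [hlen, List.drop_left]
  rw [h1, h2]

theorem pvFill_two (a b : List Char) (ha : ':' ∉ a) (hb : ':' ∉ b) :
    pvFill (a ++ ':' :: b) 3
      = PySem.Chars.zfill a 2 ++ [':'] ++
        (PySem.Chars.zfill b 2 ++ (':' :: '0' :: '0' :: [])) := by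
  rw [pvFill_step a b ha 2]
  congr 1
  unfold pvFill
  rw [pvFind_no b hb]
  simp [List.replicate]

theorem pvFill_three (a b c : List Char) (ha : ':' ∉ a) (hb : ':' ∉ b) (hc : ':' ∉ c) :
    pvFill (a ++ ':' :: (b ++ ':' :: c)) 3
      = PySem.Chars.zfill a 2 ++ [':'] ++
        (PySem.Chars.zfill b 2 ++ [':'] ++ (PySem.Chars.zfill c 2 ++ [])) := by
  rw [pvFill_step a (b ++ ':' :: c) ha 2, pvFill_step b c hb 1]
  congr 2
  unfold pvFill
  rw [pvFind_no c hc]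
  simp

-- ===== VERDICT (by name: the statement is the Claim_ definition above) =====
theorem parse_time_str_spec : Claim_equal_parse_time_str := by
  intro s _ hpre
  unfold Spec_parse_time_str parse_time_str parse_time_str_alt
  by_cases he : s = ""
  · simp [he]
  · simp only [if_neg he]
    rcases hpre with h | hlen
    · exact absurd h he
    rw [pvSplitColon_eq] at hlen ⊢
    have hnc := pvSplitC_no_colon s.toList
    cases hps : pvSplitC s.toList with
    | nil => exact absurd hps (pvSplitC_ne_nil s.toList)
    | cons a ps =>
      rw [hps] at hlen
      rcases pvSplitC_cons_cases s.toList a ps hps with ⟨hps0, hla⟩ | ⟨r1, hl1, hr1⟩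
      · -- one part: toList = a
        subst hps0
        have ha : ':' ∉ a := hnc a (hps ▸ List.mem_cons_self)
        simp only [List.map, List.length_cons, List.length_nil]
        rw [← String.toList_inj, hla]
        simp [pvFill_one a ha, PySem.Str.toList_zfill, String.toList_append]
      · cases hr1c : ps with
        | nil => rw [hr1c] at hr1; exact absurd hr1 (pvSplitC_ne_nil r1)
        | cons b qs =>
          rw [hr1c] at hr1 hps hlen
          rcases pvSplitC_cons_cases r1 b qs hr1 with ⟨hqs0, hrb⟩ | ⟨r2, hl2, hr2⟩
          · -- two parts: toList = a ++ ':' :: r1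
            subst hqs0 hrb
            have ha : ':' ∉ a := hnc a (hps ▸ List.mem_cons_self)
            have hb : ':' ∉ r1 := hnc r1 (by rw [hps]; simp)
            simp only [List.map, List.length_cons, List.length_nil]
            norm_num
            rw [← String.toList_inj, hl1]
            simp [pvFill_two a r1 ha hb, PySem.Str.toList_zfill, String.toList_append]
          · cases hr2c : qs with
            | nil => rw [hr2c] at hr2; exact absurd hr2 (pvSplitC_ne_nil r2)
            | cons c ts =>
              rw [hr2c] at hr2 hps hlen
              cases hts : ts with
              | cons d us =>
                exfalso
                rw [hts] at hlen
                simp at hlen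
                omega
              | nil =>
                rw [hts] at hr2 hps hlen
                rcases pvSplitC_cons_cases r2 c [] hr2 with ⟨_, hrc⟩ | ⟨r3, hl3, hr3⟩
                · -- three parts: toList = a ++ ':' :: (b ++ ':' :: r2)
                  subst hrc
                  have ha : ':' ∉ a := hnc a (hps ▸ List.mem_cons_self)
                  have hb : ':' ∉ b := hnc b (by rw [hps]; simp)
                  have hc : ':' ∉ r2 := hnc r2 (by rw [hps]; simp)
                  simp only [List.map, List.length_cons, List.length_nil]
                  norm_num
                  have h3 : PySem.List.slice
                      [String.ofList a, String.ofList b, String.ofList r2] none (some 3)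
                        = [String.ofList a, String.ofList b, String.ofList r2] := by
                    have hsl := PySem.List.slice_to_natCast
                      (xs := [String.ofList a, String.ofList b, String.ofList r2]) (b := 3)
                    simpa using hsl
                  rw [h3, ← String.toList_inj, hl1, hl2]
                  simp [pvFill_three a b r2 ha hb hc, PySem.Str.toList_zfill,
                    PySem.Chars.join, List.intercalate, String.toList_append]
                · exact absurd hr3 (pvSplitC_ne_nil r3)
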